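-- pv_equiv track=rewrite | github.com/image-multithresholding/Image-multithresholding | src/image_multi_thresholding/base.py | _peak_identification
-- ===== SOURCE A (Python) =====
-- from typing import List, Dict, Tuple, Callable
--
-- def _arrow_direction(freq: List[int]) -> List[int]:
--     """Returns a list with the arrow direction at each
--     cell acording to Tsai and Chen algorithm (1992)
--
--     A value is 1 if arrow is going up, -1 if it's
--     going down and 0 otherwise"""
--
--     direction = list()
--
--     # First value special case
--     if freq[0] != 0 and freq[0] <= freq[1]:
--         direction.append(-1)
--     else:
--         direction.append(0)
--
--     for i, f in enumerate(freq):
--         # Ignore first and last value since they are special cases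
--         if i == 0 or i == len(freq) - 1:
--             continue
--
--         # Previous and next frequencies
--         fp = freq[i-1]
--         fn = freq[i+1]
--
--         if f != 0 and fp > fn and fp >= f:
--             direction.append(1)  # Going down
--         elif f != 0 and fn > fp and fn >= f:
--             direction.append(-1)  # Going up
--         else:
--             direction.append(0)  # Peak or valley
--
--     #  Last value special case
--     if freq[-1] != 0 and freq[-2] >= freq[-1]:
--         direction.append(1)
--     else:
--         direction.append(0)
--
--     return direction
--
-- def _peak_identification(freq: List[int]):
--     direction = _arrow_direction(freq)
--     peaks = list()
--
--     for i, d in enumerate(direction):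
--         # Ignore first and last values
--         if i == 0 or i == len(direction) - 1:
--             continue
--
--         # Previous and next values
--         dp = direction[i-1]
--         dn = direction[i+1]
--
--         if d == 0 and dp == -1 and dn == 1:
--             peaks.append(i)
--
--     return peaks
-- ===== SOURCE B (Python) =====
-- from typing import List
--
-- def _dir(freq: List[int], i: int) -> int:
--     """Arrow direction at cell i (Tsai & Chen 1992), computed on demand;
--     encodes the first-cell and last-cell special cases."""
--     n = len(freq)
--     if i == 0:
--         return -1 if freq[0] != 0 and freq[0] <= freq[1] else 0
--     if i == n - 1:
--         return 1 if freq[-1] != 0 and freq[-2] >= freq[-1] else 0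
--     f, fp, fn = freq[i], freq[i - 1], freq[i + 1]
--     if f != 0 and fp > fn and fp >= f:
--         return 1
--     if f != 0 and fn > fp and fn >= f:
--         return -1
--     return 0
--
-- def _peak_identification(freq: List[int]):
--     n = len(freq)
--     peaks = []
--     d_prev = _dir(freq, 0)
--     d_curr = _dir(freq, 1)
--     for i in range(1, n - 1):
--         d_next = _dir(freq, i + 1)
--         if d_curr == 0 and d_prev == -1 and d_next == 1:
--             peaks.append(i)
--         d_prev, d_curr = d_curr, d_next
--     return peaks
-- ===== Notes on version B (the rewrite author's own statement) =====
-- stated objective: alternative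
-- what changed: Fused the two passes into one scan over freq that computes arrow directions on demand via a per-index helper and keeps only a rolling window (d_prev, d_curr, d_next), never materializing the direction list. Pre_ excludes lists shorter than 2: A raises IndexError there, except the accidental singleton [0] where and-short-circuiting skips the freq[1] access and returns [], while B's on-demand direction helper still raises.
-- outside the precondition, e.g. on _peak_identification([0]): A returns [], B raises IndexError; on _peak_identification([]): A raises IndexError, B raises IndexError; on _peak_identification([1]): A raises IndexError, B raises IndexError
import Mathlib
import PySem

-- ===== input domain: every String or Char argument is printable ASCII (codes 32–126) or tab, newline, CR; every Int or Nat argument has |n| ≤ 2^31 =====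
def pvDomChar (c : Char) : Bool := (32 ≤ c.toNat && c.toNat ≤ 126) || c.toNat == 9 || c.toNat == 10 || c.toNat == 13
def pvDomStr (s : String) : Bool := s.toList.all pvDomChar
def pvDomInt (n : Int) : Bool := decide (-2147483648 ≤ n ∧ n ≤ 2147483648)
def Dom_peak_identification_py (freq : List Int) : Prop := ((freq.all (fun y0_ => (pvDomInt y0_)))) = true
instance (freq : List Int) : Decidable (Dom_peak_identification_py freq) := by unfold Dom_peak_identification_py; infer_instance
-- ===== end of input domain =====

-- B fuses A's two passes into one rolling-window scan that computes arrow directions on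
-- demand (objective: alternative; equal cost, no direction list materialized).

-- ===== PORT A =====
-- _arrow_direction: builds the whole direction list (first cell, middle loop, last cell)
def pv_arrow_direction (freq : List Int) : List Int :=
  ((PySem.List.enumerate freq).foldl
    (fun acc p =>
      if p.1 = 0 ∨ p.1 = PySem.List.len freq - 1 then acc
      else
        let fp := PySem.List.pyGetD freq (p.1 - 1) 0
        let fn := PySem.List.pyGetD freq (p.1 + 1) 0
        if p.2 ≠ 0 ∧ fp > fn ∧ fp ≥ p.2 then acc ++ [1]
        else if p.2 ≠ 0 ∧ fn > fp ∧ fn ≥ p.2 then acc ++ [-1]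
        else acc ++ [0])
    (if PySem.List.pyGetD freq 0 0 ≠ 0 ∧ PySem.List.pyGetD freq 0 0 ≤ PySem.List.pyGetD freq 1 0
     then [-1] else [0]))
  ++ (if PySem.List.pyGetD freq (-1) 0 ≠ 0 ∧ PySem.List.pyGetD freq (-2) 0 ≥ PySem.List.pyGetD freq (-1) 0
          then [1] else [0])

def peak_identification_py (freq : List Int) : List Int :=
  let direction := pv_arrow_direction freq
  (PySem.List.enumerate direction 0).foldl
    (fun peaks p =>
      if p.1 = 0 ∨ p.1 = PySem.List.len direction - 1 then peaks
      else
        let dp := PySem.List.pyGetD direction (p.1 - 1) 0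
        let dn := PySem.List.pyGetD direction (p.1 + 1) 0
        if p.2 = 0 ∧ dp = -1 ∧ dn = 1 then peaks ++ [p.1] else peaks) []

-- ===== PORT B =====
-- _dir: arrow direction at a single index, with the first/last special cases inlined
def pv_dir (freq : List Int) (i : Int) : Int :=
  let n := PySem.List.len freq
  if i = 0 then
    if PySem.List.pyGetD freq 0 0 ≠ 0 ∧ PySem.List.pyGetD freq 0 0 ≤ PySem.List.pyGetD freq 1 0
    then -1 else 0
  else if i = n - 1 then
    if PySem.List.pyGetD freq (-1) 0 ≠ 0 ∧ PySem.List.pyGetD freq (-2) 0 ≥ PySem.List.pyGetD freq (-1) 0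
    then 1 else 0
  else
    let f := PySem.List.pyGetD freq i 0
    let fp := PySem.List.pyGetD freq (i - 1) 0
    let fn := PySem.List.pyGetD freq (i + 1) 0
    if f ≠ 0 ∧ fp > fn ∧ fp ≥ f then 1
    else if f ≠ 0 ∧ fn > fp ∧ fn ≥ f then -1
    else 0

def peak_identification_py_alt (freq : List Int) : List Int :=
  let n := PySem.List.len freq
  let st := (PySem.List.pyRange 1 (n - 1) 1).foldl
    (fun (st : List Int × Int × Int) i =>
      let dn := pv_dir freq (i + 1)
      ((if st.2.2 = 0 ∧ st.2.1 = -1 ∧ dn = 1 then st.1 ++ [i] else st.1), st.2.2, dn))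
    ([], pv_dir freq 0, pv_dir freq 1)
  st.1

-- ===== PRECONDITION & SPEC =====
-- Pre_ excludes lists shorter than 2: A raises IndexError there, except the accidental singleton [0]
-- where and-short-circuiting skips the freq[1] access and returns [], while B's on-demand direction
-- helper still raises.
def Pre_peak_identification_py (freq : List Int) : Prop := 2 ≤ freq.length
instance (freq : List Int) : Decidable (Pre_peak_identification_py freq) := by
  unfold Pre_peak_identification_py; infer_instance

def pvWitness_peak_identification_py : List Int := [1, 2, 0, 3, 1]

def Spec_peak_identification_py (freq : List Int) (out : List Int) : Prop := out = peak_identification_py_alt freq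
instance (freq : List Int) (out : List Int) : Decidable (Spec_peak_identification_py freq out) := by unfold Spec_peak_identification_py; infer_instance

-- ===== CLAIM (what is proved, stated in full; the proofs are below) =====
def Claim_equal_peak_identification_py : Prop := ∀ (freq : List Int), Dom_peak_identification_py freq → Pre_peak_identification_py freq → Spec_peak_identification_py freq (peak_identification_py freq)

-- ===== LEMMAS AND PROOFS =====

theorem pv_alt_roll (freq : List Int) (peaks : List Int) (a b : Int) (ha : 1 ≤ a) :
    ((PySem.List.pyRange a b 1).foldl
      (fun (st : List Int × Int × Int) i =>
        let dn := pv_dir freq (i + 1)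
        ((if st.2.2 = 0 ∧ st.2.1 = -1 ∧ dn = 1 then st.1 ++ [i] else st.1), st.2.2, dn))
      (peaks, pv_dir freq (a - 1), pv_dir freq a)).1
    = peaks ++ (PySem.List.pyRange a b 1).filter
        (fun i => decide (pv_dir freq i = 0 ∧ pv_dir freq (i - 1) = -1 ∧ pv_dir freq (i + 1) = 1)) := by
  generalize hk : (b - a).toNat = k
  induction k generalizing a peaks with
  | zero =>
    rw [PySem.List.pyRange_one_eq_nil (by omega)]
    simp
  | succ k ih =>
    have hab : a < b := by omega
    rw [PySem.List.pyRange_one_cons hab]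
    simp only [List.foldl_cons, List.filter_cons]
    have h1 : a + 1 - 1 = a := by ring
    have := ih (if pv_dir freq a = 0 ∧ pv_dir freq (a - 1) = -1 ∧ pv_dir freq (a + 1) = 1
        then peaks ++ [a] else peaks) (a + 1) (by omega) (by omega)
    rw [h1] at this
    rw [this]
    by_cases hc : pv_dir freq a = 0 ∧ pv_dir freq (a - 1) = -1 ∧ pv_dir freq (a + 1) = 1
    · simp [hc]
    · simp [hc]

def pvMid (freq : List Int) (j : Int) : Int :=
  if PySem.List.pyGetD freq j 0 ≠ 0 ∧ PySem.List.pyGetD freq (j-1) 0 > PySem.List.pyGetD freq (j+1) 0 ∧ PySem.List.pyGetD freq (j-1) 0 ≥ PySem.List.pyGetD freq j 0 then 1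
  else if PySem.List.pyGetD freq j 0 ≠ 0 ∧ PySem.List.pyGetD freq (j+1) 0 > PySem.List.pyGetD freq (j-1) 0 ∧ PySem.List.pyGetD freq (j+1) 0 ≥ PySem.List.pyGetD freq j 0 then -1
  else 0

def pvIsMidIdx (n : Int) (j : Int) : Bool := !(j == 0 || j == n - 1)

theorem pv_arrow_eq_map (freq : List Int) (h : 2 ≤ freq.length) :
    pv_arrow_direction freq
      = (PySem.List.pyRange 0 (freq.length : Int) 1).map (pv_dir freq) := by
  have hn : (2:Int) ≤ (freq.length : Int) := by exact_mod_cast h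
  unfold pv_arrow_direction
  rw [PySem.List.enumerate_eq_map_pyRange freq 0, List.foldl_map]
  rw [PySem.List.foldl_congr_mem _ _
    (fun acc j => if pvIsMidIdx (freq.length : Int) j = true then acc ++ [pvMid freq j] else acc) _ ?hcong]
  case hcong =>
    intro acc j hj
    simp only [PySem.List.len_eq]
    by_cases hs : j = 0 ∨ j = (freq.length : Int) - 1
    · have hb : ¬ (pvIsMidIdx (freq.length : Int) j = true) := by
        simp [pvIsMidIdx]; tauto
      rw [if_pos hs, if_neg hb]
    · have hb : pvIsMidIdx (freq.length : Int) j = true := by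
        simp [pvIsMidIdx]; tauto
      rw [if_neg hs, if_pos hb]
      simp only [pvMid]
      split_ifs <;> rfl
  rw [PySem.List.foldl_append_if]
  simp only [PySem.List.len_eq]
  have hsp : PySem.List.pyRange 0 ((freq.length : Int)) 1
      = [0] ++ PySem.List.pyRange 1 ((freq.length : Int) - 1) 1 ++ [(freq.length : Int) - 1] := by
    rw [PySem.List.pyRange_one_append 0 1 ((freq.length : Int)) (by omega) (by omega),
        PySem.List.pyRange_one_append 1 ((freq.length : Int) - 1) ((freq.length : Int)) (by omega) (by omega)]
    have h01 : PySem.List.pyRange (0:Int) 1 = [0] := by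
      have := PySem.List.pyRange_one_singleton (0:Int); simpa using this
    have hlast : PySem.List.pyRange ((freq.length : Int) - 1) ((freq.length : Int)) = [(freq.length : Int) - 1] := by
      have := PySem.List.pyRange_one_singleton ((freq.length : Int) - 1)
      have he : (freq.length : Int) - 1 + 1 = (freq.length : Int) := by ring
      rw [he] at this; exact this
    rw [h01, hlast, List.append_assoc]
  rw [hsp]
  simp only [List.filter_append, List.map_append, List.filter_cons, List.filter_nil,
    List.map_cons, List.map_nil, List.append_assoc]
  have hm0 : pvIsMidIdx ((freq.length : Int)) 0 = false := by simp [pvIsMidIdx]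
  have hmn : pvIsMidIdx ((freq.length : Int)) ((freq.length : Int) - 1) = false := by simp [pvIsMidIdx]
  simp only [hm0, hmn, Bool.false_eq_true, if_false]
  have hmid : List.filter (pvIsMidIdx ((freq.length : Int))) (PySem.List.pyRange 1 ((freq.length : Int) - 1) 1)
      = PySem.List.pyRange 1 ((freq.length : Int) - 1) 1 := by
    apply List.filter_eq_self.mpr
    intro j hj
    have := PySem.List.mem_pyRange_one.mp hj
    simp [pvIsMidIdx]; omega
  rw [hmid]
  have hmap : List.map (pvMid freq) (PySem.List.pyRange 1 ((freq.length : Int) - 1) 1)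
      = List.map (pv_dir freq) (PySem.List.pyRange 1 ((freq.length : Int) - 1) 1) := by
    apply List.map_congr_left
    intro j hj
    have hjm := PySem.List.mem_pyRange_one.mp hj
    simp only [pv_dir, PySem.List.len_eq]
    rw [if_neg (by omega), if_neg (by omega)]
    simp only [pvMid]
  rw [hmap]
  have hd0 : pv_dir freq 0
      = if PySem.List.pyGetD freq 0 0 ≠ 0 ∧ PySem.List.pyGetD freq 0 0 ≤ PySem.List.pyGetD freq 1 0 then -1 else 0 := by
    simp [pv_dir]
  have hdl : pv_dir freq ((freq.length : Int) - 1)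
      = if PySem.List.pyGetD freq (-1) 0 ≠ 0 ∧ PySem.List.pyGetD freq (-2) 0 ≥ PySem.List.pyGetD freq (-1) 0 then 1 else 0 := by
    simp only [pv_dir, PySem.List.len_eq]
    rw [if_neg (by omega)]
    simp
  rw [hd0, hdl]
  split_ifs <;> simp

theorem peak_main (freq : List Int) (h : 2 ≤ freq.length) :
    peak_identification_py freq = peak_identification_py_alt freq := by
  have hn : (2:Int) ≤ (freq.length : Int) := by exact_mod_cast h
  -- B side
  have hroll := pv_alt_roll freq [] 1 ((freq.length : Int) - 1) le_rfl
  norm_num at hroll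
  have hB : peak_identification_py_alt freq
      = (PySem.List.pyRange 1 ((freq.length : Int) - 1) 1).filter
          (fun i => decide (pv_dir freq i = 0 ∧ pv_dir freq (i - 1) = -1 ∧ pv_dir freq (i + 1) = 1)) := by
    simp only [peak_identification_py_alt, PySem.List.len_eq]
    rw [hroll]
    apply List.filter_congr
    intro x hx
    simp
  rw [hB]
  -- A side
  simp only [peak_identification_py]
  rw [pv_arrow_eq_map freq h]
  have hlenD : PySem.List.len ((PySem.List.pyRange 0 ((freq.length : Int)) 1).map (pv_dir freq))
      = (freq.length : Int) := by
    simp [PySem.List.len_eq, PySem.List.length_pyRange_one]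
  simp only [hlenD]
  rw [PySem.List.enumerate_eq_map_pyRange _ 0, List.foldl_map, hlenD]
  rw [PySem.List.foldl_congr_mem _ _
    (fun acc j => if j = 0 ∨ j = (freq.length : Int) - 1 then acc
      else if pv_dir freq j = 0 ∧ pv_dir freq (j - 1) = -1 ∧ pv_dir freq (j + 1) = 1
        then acc ++ [j] else acc) _ ?hc]
  case hc =>
    intro acc j hj
    have hjr := PySem.List.mem_pyRange_one.mp hj
    by_cases hs : j = 0 ∨ j = (freq.length : Int) - 1
    · simp [hs]
    · rw [if_neg hs]
      dsimp only
      rw [PySem.List.pyGetD_map_pyRange_of_nonneg _ _ _ _ (by omega) (by omega),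
          PySem.List.pyGetD_map_pyRange_of_nonneg _ _ _ _ (by omega) (by omega),
          PySem.List.pyGetD_map_pyRange_of_nonneg _ _ _ _ (by omega) (by omega)]
      rw [if_neg hs]
  have hsp : PySem.List.pyRange 0 ((freq.length : Int)) 1
      = [0] ++ PySem.List.pyRange 1 ((freq.length : Int) - 1) 1 ++ [(freq.length : Int) - 1] := by
    rw [PySem.List.pyRange_one_append 0 1 ((freq.length : Int)) (by omega) (by omega),
        PySem.List.pyRange_one_append 1 ((freq.length : Int) - 1) ((freq.length : Int)) (by omega) (by omega)]
    have h01 : PySem.List.pyRange (0:Int) 1 = [0] := by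
      have := PySem.List.pyRange_one_singleton (0:Int); simpa using this
    have hlast : PySem.List.pyRange ((freq.length : Int) - 1) ((freq.length : Int)) = [(freq.length : Int) - 1] := by
      have := PySem.List.pyRange_one_singleton ((freq.length : Int) - 1)
      have he : (freq.length : Int) - 1 + 1 = (freq.length : Int) := by ring
      rw [he] at this; exact this
    rw [h01, hlast, List.append_assoc]
  rw [hsp, List.foldl_append, List.foldl_append]
  simp only [List.foldl_cons, List.foldl_nil, true_or, or_true, if_true]
  rw [PySem.List.foldl_congr_mem _ _
    (fun acc j => if pv_dir freq j = 0 ∧ pv_dir freq (j - 1) = -1 ∧ pv_dir freq (j + 1) = 1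
      then acc ++ [j] else acc) _ ?hmid]
  case hmid =>
    intro acc j hj
    have hjr := PySem.List.mem_pyRange_one.mp hj
    rw [if_neg (by omega)]
  rw [PySem.List.foldl_append_ite_eq_filter]
  simp

-- ===== VERDICT (by name: the statement is the Claim_ definition above) =====
theorem peak_identification_py_spec : Claim_equal_peak_identification_py := by
  intro freq _ hpre
  exact peak_main freq hpre
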